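-- pv_equiv track=rewrite | github.com/zachyking/triage-warden | python/tw_ai/analysis/phishing.py | _assess_attachment_risk
-- ===== SOURCE A (Python) =====
-- from typing import Literal
--
-- HIGH_RISK_EXTENSIONS = {".exe", ".scr", ".bat", ".cmd", ".ps1", ".vbs", ".js", ".jse", ".wsf", ".msi", ".com", ".pif"}
--
-- MEDIUM_RISK_EXTENSIONS = {".doc", ".docm", ".xls", ".xlsm", ".ppt", ".pptm", ".zip", ".rar", ".7z", ".iso", ".img"}
--
-- LOW_RISK_EXTENSIONS = {".pdf", ".docx", ".xlsx", ".pptx", ".txt", ".csv", ".png", ".jpg", ".jpeg", ".gif"}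
--
-- def _assess_attachment_risk(attachments: list[str]) -> Literal["none", "low", "medium", "high", "critical"]:
--     """Assess the risk level of email attachments.
--
--     Args:
--         attachments: List of attachment filenames.
--
--     Returns:
--         Risk level based on file extensions.
--     """
--     if not attachments:
--         return "none"
--
--     highest_risk = "none"
--     risk_order = ["none", "low", "medium", "high", "critical"]
--
--     for attachment in attachments:
--         ext = _get_file_extension(attachment)
--
--         if ext in HIGH_RISK_EXTENSIONS:
--             # Check for double extension tricks
--             if _has_double_extension(attachment):
--                 return "critical"
--             if risk_order.index("high") > risk_order.index(highest_risk):
--                 highest_risk = "high"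
--         elif ext in MEDIUM_RISK_EXTENSIONS:
--             if risk_order.index("medium") > risk_order.index(highest_risk):
--                 highest_risk = "medium"
--         elif ext in LOW_RISK_EXTENSIONS:
--             if risk_order.index("low") > risk_order.index(highest_risk):
--                 highest_risk = "low"
--
--     return highest_risk
--
-- def _get_file_extension(filename: str) -> str:
--     """Get lowercase file extension including the dot."""
--     if "." in filename:
--         return "." + filename.rsplit(".", 1)[-1].lower()
--     return ""
--
-- def _has_double_extension(filename: str) -> bool:
--     """Check for double extension tricks (e.g., document.pdf.exe)."""
--     parts = filename.lower().split(".")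
--     if len(parts) >= 3:
--         # Check if the final extension is executable
--         final_ext = "." + parts[-1]
--         penultimate_ext = "." + parts[-2]
--         if final_ext in HIGH_RISK_EXTENSIONS and penultimate_ext in LOW_RISK_EXTENSIONS:
--             return True
--     return False
-- ===== SOURCE B (Python) =====
-- HIGH_RISK_EXTENSIONS = {".exe", ".scr", ".bat", ".cmd", ".ps1", ".vbs", ".js", ".jse", ".wsf", ".msi", ".com", ".pif"}
-- MEDIUM_RISK_EXTENSIONS = {".doc", ".docm", ".xls", ".xlsm", ".ppt", ".pptm", ".zip", ".rar", ".7z", ".iso", ".img"}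
-- LOW_RISK_EXTENSIONS = {".pdf", ".docx", ".xlsx", ".pptx", ".txt", ".csv", ".png", ".jpg", ".jpeg", ".gif"}
--
--
-- def _get_file_extension(filename: str) -> str:
--     """Get lowercase file extension including the dot."""
--     if "." in filename:
--         return "." + filename.rsplit(".", 1)[-1].lower()
--     return ""
--
--
-- def _has_double_extension(filename: str) -> bool:
--     """Check for double extension tricks (e.g., document.pdf.exe)."""
--     parts = filename.lower().split(".")
--     if len(parts) >= 3:
--         final_ext = "." + parts[-1]
--         penultimate_ext = "." + parts[-2]
--         if final_ext in HIGH_RISK_EXTENSIONS and penultimate_ext in LOW_RISK_EXTENSIONS: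
--             return True
--     return False
--
--
-- _RISK_RANK = {**{e: 1 for e in LOW_RISK_EXTENSIONS},
--               **{e: 2 for e in MEDIUM_RISK_EXTENSIONS},
--               **{e: 3 for e in HIGH_RISK_EXTENSIONS}}
-- _LABELS = ["none", "low", "medium", "high"]
--
--
-- def _assess_attachment_risk(attachments: list) -> str:
--     # Pass 1: any double-extension trick on a high-risk attachment is terminal.
--     if any(_get_file_extension(a) in HIGH_RISK_EXTENSIONS and _has_double_extension(a)
--            for a in attachments):
--         return "critical"
--     # Pass 2: max-reduction over one merged ext -> rank table.
--     best = max((_RISK_RANK.get(_get_file_extension(a), 0) for a in attachments), default=0)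
--     return _LABELS[best]
-- ===== Notes on version B (the rewrite author's own statement) =====
-- stated objective: alternative
-- what changed: Replaced the single early-return loop that threads a highest_risk label through risk_order.index comparisons with two independent passes: an any() pass for the critical double-extension case, then a max() reduction over one merged ext->rank table mapped back to a label.
import Mathlib
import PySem

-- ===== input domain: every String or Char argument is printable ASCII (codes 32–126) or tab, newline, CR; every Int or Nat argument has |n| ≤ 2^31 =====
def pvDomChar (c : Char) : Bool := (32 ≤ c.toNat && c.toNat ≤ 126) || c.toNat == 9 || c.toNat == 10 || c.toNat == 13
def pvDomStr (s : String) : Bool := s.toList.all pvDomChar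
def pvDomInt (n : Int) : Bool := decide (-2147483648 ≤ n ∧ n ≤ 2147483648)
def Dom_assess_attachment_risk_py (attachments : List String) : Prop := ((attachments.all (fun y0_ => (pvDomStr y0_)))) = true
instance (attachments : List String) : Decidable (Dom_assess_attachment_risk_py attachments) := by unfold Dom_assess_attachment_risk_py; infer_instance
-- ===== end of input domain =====

-- B replaces A's single early-return loop (ranked-label bookkeeping via risk_order.index)
-- with two independent passes: an any() pass for "critical", then a max() over a merged
-- ext->rank table; objective: alternative decomposition (not claimed faster).

-- ===== PORT A =====
-- module constants: Python sets of string literals (all distinct)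
def pvHIGH : List String := [".exe", ".scr", ".bat", ".cmd", ".ps1", ".vbs", ".js", ".jse", ".wsf", ".msi", ".com", ".pif"]
def pvMEDIUM : List String := [".doc", ".docm", ".xls", ".xlsm", ".ppt", ".pptm", ".zip", ".rar", ".7z", ".iso", ".img"]
def pvLOW : List String := [".pdf", ".docx", ".xlsx", ".pptx", ".txt", ".csv", ".png", ".jpg", ".jpeg", ".gif"]

-- _get_file_extension; 'filename.rsplit(".", 1)[-1]' is ported by hand as the last piece of
-- the full split (exact: rsplit with maxsplit=1 keeps the text after the LAST "." as its
-- last element, which is exactly the last piece of filename.split("."))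
def pvGetFileExtension (filename : String) : String :=
  if PySem.Str.isIn "." filename then
    "." ++ PySem.Str.lower ((((PySem.Str.split? filename ".").getD []).getLastD ""))
  else ""

-- _has_double_extension
def pvHasDoubleExtension (filename : String) : Bool :=
  let parts := (PySem.Str.split? (PySem.Str.lower filename) ".").getD []  -- split? is none only for sep = "", so .getD [] is inert
  if parts.length ≥ 3 then
    let finalExt := "." ++ PySem.List.pyGetD parts (-1) ""
    let penultimateExt := "." ++ PySem.List.pyGetD parts (-2) ""
    pvHIGH.contains finalExt && pvLOW.contains penultimateExt
  else false

def pvRiskOrder : List String := ["none", "low", "medium", "high", "critical"]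

-- risk_order.index(s); every argument A passes is in the list, so .index never raises
def pvRiskIndex (s : String) : Int := (PySem.List.index? pvRiskOrder s).getD 0

-- the for-loop of A, threading highest_risk; an early 'return "critical"' stops the recursion
def pvLoopA : List String → String → String
  | [], highest => highest
  | a :: rest, highest =>
    let ext := pvGetFileExtension a
    if pvHIGH.contains ext then
      if pvHasDoubleExtension a then "critical"
      else pvLoopA rest (if pvRiskIndex "high" > pvRiskIndex highest then "high" else highest)
    else if pvMEDIUM.contains ext then
      pvLoopA rest (if pvRiskIndex "medium" > pvRiskIndex highest then "medium" else highest)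
    else if pvLOW.contains ext then
      pvLoopA rest (if pvRiskIndex "low" > pvRiskIndex highest then "low" else highest)
    else pvLoopA rest highest

def assess_attachment_risk_py (attachments : List String) : String :=
  if attachments = [] then "none"
  else pvLoopA attachments "none"

-- ===== PORT B =====
-- _RISK_RANK = {**{e:1 for e in LOW}, **{e:2 for e in MEDIUM}, **{e:3 for e in HIGH}}
def pvRiskRank : PySem.Dict String Int :=
  pvHIGH.foldl (fun d e => d.insert e 3)
    (pvMEDIUM.foldl (fun d e => d.insert e 2)
      (pvLOW.foldl (fun d e => d.insert e 1) PySem.Dict.empty))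

def pvLabels : List String := ["none", "low", "medium", "high"]

def assess_attachment_risk_py_alt (attachments : List String) : String :=
  if attachments.any (fun a => pvHIGH.contains (pvGetFileExtension a) && pvHasDoubleExtension a) then
    "critical"
  else
    -- max(generator, default=0)
    let best : Int :=
      (PySem.List.max? (attachments.map (fun a => pvRiskRank.getD (pvGetFileExtension a) 0))
        (fun x => x)).getD 0
    PySem.List.pyGetD pvLabels best ""

-- ===== PRECONDITION & SPEC =====
def Spec_assess_attachment_risk_py (attachments : List String) (out : String) : Prop := out = assess_attachment_risk_py_alt attachments
instance (attachments : List String) (out : String) : Decidable (Spec_assess_attachment_risk_py attachments out) := by unfold Spec_assess_attachment_risk_py; infer_instance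

-- ===== CLAIM (what is proved, stated in full; the proofs are below) =====
def Claim_equal_assess_attachment_risk_py : Prop := ∀ (attachments : List String), Dom_assess_attachment_risk_py attachments → Spec_assess_attachment_risk_py attachments (assess_attachment_risk_py attachments)

-- ===== LEMMAS AND PROOFS =====

-- proof-side helpers
def pvRank (e : String) : Nat :=
  if pvHIGH.contains e then 3
  else if pvMEDIUM.contains e then 2
  else if pvLOW.contains e then 1
  else 0

def pvLabel (k : Nat) : String := pvLabels.getD k ""

def pvCrit (a : String) : Bool := pvHIGH.contains (pvGetFileExtension a) && pvHasDoubleExtension a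

lemma pvGetD_foldl_insert_const (l : List String) (d : PySem.Dict String Int) (v : Int)
    (e : String) :
    (l.foldl (fun d k => d.insert k v) d).getD e 0 = if l.contains e then v else d.getD e 0 := by
  induction l generalizing d with
  | nil => simp
  | cons k t ih =>
      simp only [List.foldl_cons, ih, PySem.Dict.getD_insert, List.contains_cons]
      by_cases h1 : t.contains e = true <;> by_cases h2 : e = k <;> simp [h1, h2]

lemma pvRiskRank_getD (e : String) : pvRiskRank.getD e 0 = (pvRank e : Int) := by
  unfold pvRiskRank pvRank
  simp only [pvGetD_foldl_insert_const, PySem.Dict.getD_empty]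
  split_ifs <;> norm_num

lemma pvLoopA_eq (xs : List String) : ∀ k : Nat, k ≤ 3 →
    pvLoopA xs (pvLabel k) =
      if xs.any pvCrit then "critical"
      else pvLabel (xs.foldl (fun m a => max m (pvRank (pvGetFileExtension a))) k) := by
  induction xs with
  | nil => intro k hk; simp [pvLoopA]
  | cons a rest ih =>
    intro k hk
    have hca : pvCrit a = (pvHIGH.contains (pvGetFileExtension a) && pvHasDoubleExtension a) := rfl
    simp only [pvLoopA, List.any_cons, List.foldl_cons]
    by_cases hH : pvHIGH.contains (pvGetFileExtension a) = true
    · by_cases hD : pvHasDoubleExtension a = true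
      · rw [if_pos hH, if_pos hD,
          if_pos (show (pvCrit a || rest.any pvCrit) = true by rw [hca, hH, hD]; rfl)]
      · have hDf : pvHasDoubleExtension a = false := by
          revert hD; cases pvHasDoubleExtension a <;> simp
        have hcf : pvCrit a = false := by rw [hca, hDf, Bool.and_false]
        have hr : pvRank (pvGetFileExtension a) = 3 := by unfold pvRank; rw [hH]; rfl
        have hub : (if pvRiskIndex "high" > pvRiskIndex (pvLabel k) then "high" else pvLabel k)
            = pvLabel (max k 3) := by interval_cases k <;> decide
        rw [if_pos hH, if_neg hD, hub, ih (max k 3) (by omega), hcf, Bool.false_or, hr]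
    · have hHf : pvHIGH.contains (pvGetFileExtension a) = false := by
        revert hH; cases pvHIGH.contains (pvGetFileExtension a) <;> simp
      have hcf : pvCrit a = false := by rw [hca, hHf, Bool.false_and]
      rw [if_neg hH, hcf, Bool.false_or]
      by_cases hM : pvMEDIUM.contains (pvGetFileExtension a) = true
      · have hr : pvRank (pvGetFileExtension a) = 2 := by unfold pvRank; rw [hHf, hM]; rfl
        have hub : (if pvRiskIndex "medium" > pvRiskIndex (pvLabel k) then "medium" else pvLabel k)
            = pvLabel (max k 2) := by interval_cases k <;> decide
        rw [if_pos hM, hub, ih (max k 2) (by omega), hr]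
      · have hMf : pvMEDIUM.contains (pvGetFileExtension a) = false := by
          revert hM; cases pvMEDIUM.contains (pvGetFileExtension a) <;> simp
        by_cases hL : pvLOW.contains (pvGetFileExtension a) = true
        · have hr : pvRank (pvGetFileExtension a) = 1 := by
            unfold pvRank; rw [hHf, hMf, hL]; rfl
          have hub : (if pvRiskIndex "low" > pvRiskIndex (pvLabel k) then "low" else pvLabel k)
              = pvLabel (max k 1) := by interval_cases k <;> decide
          rw [if_neg hM, if_pos hL, hub, ih (max k 1) (by omega), hr]
        · have hLf : pvLOW.contains (pvGetFileExtension a) = false := by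
            revert hL; cases pvLOW.contains (pvGetFileExtension a) <;> simp
          have hr : pvRank (pvGetFileExtension a) = 0 := by
            unfold pvRank; rw [hHf, hMf, hLf]; rfl
          rw [if_neg hM, if_neg hL, hr, show max k 0 = k by omega, ih k hk]

lemma pvFoldMax_cast (t : List String) : ∀ k : Nat,
    List.foldl max ((k : Int)) (t.map (fun a => (pvRank (pvGetFileExtension a) : Int)))
      = ((t.foldl (fun m a => max m (pvRank (pvGetFileExtension a))) k : Nat) : Int) := by
  induction t with
  | nil => intro k; simp
  | cons a rest ih =>
      intro k
      simp only [List.map_cons, List.foldl_cons]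
      rw [show max ((k : Int)) ((pvRank (pvGetFileExtension a) : Int))
            = ((max k (pvRank (pvGetFileExtension a)) : Nat) : Int) from (Nat.cast_max k _).symm,
        ih]

-- ===== VERDICT (by name: the statement is the Claim_ definition above) =====
theorem assess_attachment_risk_py_spec : Claim_equal_assess_attachment_risk_py := by
  intro xs _
  unfold Spec_assess_attachment_risk_py assess_attachment_risk_py assess_attachment_risk_py_alt
  match xs with
  | [] => rfl
  | a :: t =>
    have hpred : ((a :: t).any fun x =>
        pvHIGH.contains (pvGetFileExtension x) && pvHasDoubleExtension x)
        = (a :: t).any pvCrit := rfl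
    rw [if_neg (List.cons_ne_nil a t)]
    have h0 := pvLoopA_eq (a :: t) 0 (by omega)
    have hlab : pvLabel 0 = "none" := rfl
    rw [← hlab, h0, hpred]
    by_cases hc : (a :: t).any pvCrit = true
    · rw [if_pos hc, if_pos hc]
    · rw [if_neg hc, if_neg hc]
      simp only [List.map_cons, pvRiskRank_getD, PySem.List.max?_id_cons, Option.getD_some]
      rw [pvFoldMax_cast t (pvRank (pvGetFileExtension a)), PySem.List.pyGetD_natCast,
        List.foldl_cons, show max 0 (pvRank (pvGetFileExtension a))
          = pvRank (pvGetFileExtension a) by omega]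
      rfl
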